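-- pv_equiv track=rewrite | github.com/Kai124816/Class-Encore-Winter | week_10/solutions.py | smallest_each
-- ===== SOURCE A (Python) =====
-- def smallest_each(li: list[tuple[str, int]]) -> list[tuple[str, int]]:
--     """
--     From a list of (name, value) pairs, select the pairs with the smallest
--     value for each name. >>> smallest_each([("apple", 13), ("orange", 12), ("apple", 7), ("orange", 22)])
--     [('apple', 7), ('orange', 12)]
--     """
--     pair_dict = {}
--     for el in li:
--         if el[0] in pair_dict.keys() and el[1] < pair_dict[el[0]]:
--             pair_dict[el[0]] = el[1]
--         elif el[0] not in pair_dict.keys():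
--             pair_dict[el[0]] = el[1]
--
--     final_list = []
--     for key in pair_dict.keys():
--         final_list.append((key,pair_dict[key]))
--
--     return final_list
-- ===== SOURCE B (Python) =====
-- def smallest_each(li: list[tuple[str, int]]) -> list[tuple[str, int]]:
--     # Group all values per name first (dict preserves first-appearance order),
--     # then reduce each group with min() in a second pass.
--     groups = {}
--     for name, value in li:
--         groups.setdefault(name, []).append(value)
--     return [(name, min(values)) for name, values in groups.items()]
-- ===== Notes on version B (the rewrite author's own statement) =====
-- stated objective: alternative
-- what changed: B first builds a dict grouping every value under its name, then reduces each complete group with min() in a second pass, instead of A's single pass maintaining a running minimum per name with membership/comparison branching.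
import Mathlib
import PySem

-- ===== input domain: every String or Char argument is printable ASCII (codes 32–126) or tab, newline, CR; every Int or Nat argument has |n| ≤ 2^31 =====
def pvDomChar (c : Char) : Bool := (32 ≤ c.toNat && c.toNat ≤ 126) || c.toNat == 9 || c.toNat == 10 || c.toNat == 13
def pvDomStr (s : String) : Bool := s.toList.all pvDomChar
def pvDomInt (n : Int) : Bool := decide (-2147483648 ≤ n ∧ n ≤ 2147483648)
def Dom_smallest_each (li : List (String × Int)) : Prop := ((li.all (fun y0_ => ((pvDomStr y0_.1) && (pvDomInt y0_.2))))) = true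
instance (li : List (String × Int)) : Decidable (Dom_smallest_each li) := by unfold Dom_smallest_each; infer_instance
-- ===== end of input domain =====

-- B groups all values per name in one pass and reduces each group with min() in a
-- second pass, instead of A's running-minimum dict with comparison branching (alternative decomposition, same cost).

-- ===== PORT A =====
def smallest_each (li : List (String × Int)) : List (String × Int) :=
  let pair_dict : PySem.Dict String Int :=
    li.foldl (fun d el =>
      if d.contains el.1 && decide (el.2 < d.getD el.1 0) then d.insert el.1 el.2
      else if !(d.contains el.1) then d.insert el.1 el.2
      else d) PySem.Dict.empty
  pair_dict.keys.foldl (fun acc k => acc ++ [(k, pair_dict.getD k 0)]) []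

-- ===== PORT B =====
-- min(values) on a nonempty list; the default 0 of min? is never used (every group is nonempty)
def smallest_each_alt (li : List (String × Int)) : List (String × Int) :=
  let groups : PySem.Dict String (List Int) :=
    li.foldl (fun d p => d.modify p.1 [] (· ++ [p.2])) PySem.Dict.empty
  groups.items.map (fun p => (p.1, (PySem.List.min? p.2 (fun x => x)).getD 0))

-- ===== PRECONDITION & SPEC =====
def Spec_smallest_each (li : List (String × Int)) (out : List (String × Int)) : Prop := out = smallest_each_alt li
instance (li : List (String × Int)) (out : List (String × Int)) : Decidable (Spec_smallest_each li out) := by unfold Spec_smallest_each; infer_instance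

-- ===== CLAIM (what is proved, stated in full; the proofs are below) =====
def Claim_equal_smallest_each : Prop := ∀ (li : List (String × Int)), Dom_smallest_each li → Spec_smallest_each li (smallest_each li)

-- ===== LEMMAS AND PROOFS =====

-- A's loop body, named for the lemmas below
def stepA (d : PySem.Dict String Int) (el : String × Int) : PySem.Dict String Int :=
  if d.contains el.1 && decide (el.2 < d.getD el.1 0) then d.insert el.1 el.2
  else if !(d.contains el.1) then d.insert el.1 el.2
  else d

theorem keys_stepA (d : PySem.Dict String Int) (el : String × Int) :
    (stepA d el).keys = PySem.Set.add d.keys el.1 := by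
  unfold stepA
  by_cases hc : d.contains el.1
  · have hmem : el.1 ∈ d.keys := (PySem.Dict.contains_iff_mem_keys d el.1).1 hc
    have hadd : PySem.Set.add d.keys el.1 = d.keys := by
      simp [PySem.Set.add, PySem.Set.contains, hmem]
    by_cases hlt : el.2 < d.getD el.1 0 <;>
      simp [hc, hlt, PySem.Dict.keys_insert_of_contains d _ hc, hadd]
  · have hmem : el.1 ∉ d.keys := fun h => hc ((PySem.Dict.contains_iff_mem_keys d el.1).2 h)
    have hc' : d.contains el.1 = false := by simpa using hc
    simp [hc', PySem.Dict.keys_insert_of_not_contains d _ hc',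
      PySem.Set.add, PySem.Set.contains, hmem]

theorem keys_foldA (li : List (String × Int)) (d : PySem.Dict String Int) :
    (li.foldl stepA d).keys = PySem.Set.update d.keys (li.map Prod.fst) := by
  induction li generalizing d with
  | nil => simp [PySem.Set.update_nil]
  | cons a t ih =>
      simp only [List.foldl_cons, List.map_cons, PySem.Set.update_cons]
      rw [ih, keys_stepA]

theorem get?_foldA (li : List (String × Int)) (d : PySem.Dict String Int) (k : String) :
    (li.foldl stepA d).get? k =
      match d.get? k with
      | some v0 => some (((li.filter (fun p => p.1 == k)).map Prod.snd).foldl min v0)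
      | none =>
        match (li.filter (fun p => p.1 == k)).map Prod.snd with
        | [] => none
        | v :: vs => some (vs.foldl min v) := by
  induction li generalizing d with
  | nil => cases h : d.get? k <;> simp [h]
  | cons a t ih =>
      simp only [List.foldl_cons]
      rw [ih]
      by_cases hk : a.1 = k
      · subst hk
        cases hd : d.get? a.1 with
        | some v0 =>
            have hc : d.contains a.1 = true := by
              rw [PySem.Dict.contains_eq_isSome_get?, hd]; rfl
            have hgd : d.getD a.1 0 = v0 := PySem.Dict.getD_of_get?_eq_some d 0 hd
            by_cases hlt : a.2 < v0
            · have hstep : (stepA d a).get? a.1 = some a.2 := by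
                unfold stepA; simp [hc, hgd, hlt, PySem.Dict.get?_insert_self]
              rw [hstep]
              have hmin : min v0 a.2 = a.2 := by omega
              simp [hmin]
            · have hstep : (stepA d a).get? a.1 = some v0 := by
                unfold stepA; simp [hc, hgd, hlt, hd]
              rw [hstep]
              have hmin : min v0 a.2 = v0 := by omega
              simp [hmin]
        | none =>
            have hc : d.contains a.1 = false := by
              rw [PySem.Dict.contains_eq_isSome_get?, hd]; rfl
            have hstep : (stepA d a).get? a.1 = some a.2 := by
              unfold stepA; simp [hc, PySem.Dict.get?_insert_self]
            rw [hstep]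
            simp
      · have hbeq : (a.1 == k) = false := by simp [hk]
        have hstep : (stepA d a).get? k = d.get? k := by
          unfold stepA
          split_ifs <;>
            first
            | rfl
            | exact PySem.Dict.get?_insert_of_ne d _ (fun h => hk h.symm)
        rw [hstep]
        simp [hbeq]

theorem foldl_append_map {α β : Type} (l : List α) (f : α → β) (acc : List β) :
    l.foldl (fun acc k => acc ++ [f k]) acc = acc ++ l.map f := by
  induction l generalizing acc with
  | nil => simp
  | cons a t ih => simp [ih]

theorem smallest_each_spec_aux (li : List (String × Int)) :
    smallest_each li = smallest_each_alt li := by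
  unfold smallest_each smallest_each_alt
  simp only []
  set dA := li.foldl (fun d el =>
      if d.contains el.1 && decide (el.2 < d.getD el.1 0) then d.insert el.1 el.2
      else if !(d.contains el.1) then d.insert el.1 el.2
      else d) PySem.Dict.empty with hdA
  set dB := li.foldl (fun d p => d.modify p.1 [] (· ++ [p.2])) PySem.Dict.empty with hdB
  have hdA' : dA = li.foldl stepA PySem.Dict.empty := by rw [hdA]; rfl
  -- both key lists are the distinct names in first-appearance order
  have hkA : dA.keys = PySem.Set.ofList (li.map Prod.fst) := by
    rw [hdA', keys_foldA]; simp [PySem.Dict.keys_empty, PySem.Set.update_nil_left]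
  have hkB : dB.keys = PySem.Set.ofList (li.map Prod.fst) := by
    rw [hdB, PySem.Dict.keys_foldl_modify_key]
    simp [PySem.Dict.keys_empty, PySem.Set.update_nil_left]
  have hnodupB : dB.keys.Nodup := by
    rw [hdB]; exact PySem.Dict.nodup_keys_foldl_modify_key _ _ _ _ _ PySem.Dict.nodup_keys_empty
  rw [foldl_append_map, PySem.Dict.items_eq_map_keys dB hnodupB [], List.map_map]
  simp only [List.nil_append, hkA, hkB]
  apply List.map_congr_left
  intro k hk
  -- k occurs as a name in li
  have hkin : k ∈ li.map Prod.fst := (PySem.Set.mem_ofList (li.map Prod.fst) k).1 hk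
  obtain ⟨p, hp, hpk⟩ := List.mem_map.1 hkin
  have hvalsB : dB.getD k [] = (li.filter (fun p => p.1 == k)).map Prod.snd := by
    rw [hdB, PySem.Dict.getD_foldl_modify_append]
    simp [PySem.Dict.getD_empty]
  have hpf : p ∈ li.filter (fun p => p.1 == k) := by
    refine List.mem_filter.2 ⟨hp, ?_⟩; simp [hpk]
  cases hv : (li.filter (fun p => p.1 == k)).map Prod.snd with
  | nil =>
      exfalso
      have : p.2 ∈ (li.filter (fun p => p.1 == k)).map Prod.snd := List.mem_map_of_mem hpf
      rw [hv] at this; exact absurd this (List.not_mem_nil)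
  | cons v vs =>
      have hgA : dA.get? k = some (vs.foldl min v) := by
        rw [hdA', get?_foldA]
        simp [PySem.Dict.get?_empty, hv]
      have : dA.getD k 0 = vs.foldl min v := PySem.Dict.getD_of_get?_eq_some dA 0 hgA
      simp [Function.comp, this, hvalsB, hv, PySem.List.min?_id_cons]

-- ===== VERDICT (by name: the statement is the Claim_ definition above) =====
theorem smallest_each_spec : Claim_equal_smallest_each := by
  intro li _
  unfold Spec_smallest_each
  exact smallest_each_spec_aux li
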